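-- pv_equiv track=rewrite | github.com/garciaagui/trybe-exercicios | modulo-04-ciencia-da-computacao/bloco-36-secao-05_estrutura-de-dados-I/dia-03_arrays/exercises/exercise_05.py | get_same_row_connections
-- ===== SOURCE A (Python) =====
-- def get_same_row_connections(servers):
--     counter = 0
--     stop = len(servers)
--
--     for index, server in enumerate(servers):
--         for i in range(index + 1, stop):
--             if server == servers[i] == 1:
--                 counter += 1
--
--     return counter
-- ===== SOURCE B (Python) =====
-- def get_same_row_connections(servers):
--     ones = servers.count(1)
--     return ones * (ones - 1) // 2
-- ===== Notes on version B (the rewrite author's own statement) =====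
-- stated objective: faster
-- what changed: Replaces the quadratic double loop over index pairs by a single count of 1s followed by the closed form c*(c-1)//2.
import Mathlib
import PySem

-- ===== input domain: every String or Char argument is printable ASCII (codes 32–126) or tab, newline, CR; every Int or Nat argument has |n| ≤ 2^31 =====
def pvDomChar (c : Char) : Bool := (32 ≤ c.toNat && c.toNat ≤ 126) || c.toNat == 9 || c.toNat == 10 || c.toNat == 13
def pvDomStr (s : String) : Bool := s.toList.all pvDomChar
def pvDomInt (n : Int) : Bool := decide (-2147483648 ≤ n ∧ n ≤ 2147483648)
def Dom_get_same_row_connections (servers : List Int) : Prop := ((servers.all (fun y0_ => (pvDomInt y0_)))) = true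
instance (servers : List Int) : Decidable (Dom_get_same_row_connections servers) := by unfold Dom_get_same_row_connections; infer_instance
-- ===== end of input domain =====

-- B replaces A's quadratic scan over index pairs by one count of 1s and the closed form c*(c-1)//2 (faster).

-- ===== PORT A =====
def get_same_row_connections (servers : List Int) : Int :=
  let stop : Int := (servers.length : Int)
  (PySem.List.enumerate servers 0).foldl
    (fun counter p =>
      (PySem.List.pyRange (p.1 + 1) stop 1).foldl
        (fun c i =>
          if (p.2 == PySem.List.pyGetD servers i 0 && PySem.List.pyGetD servers i 0 == 1) then c + 1 else c)
        counter)
    0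

-- ===== PORT B =====
def get_same_row_connections_alt (servers : List Int) : Int :=
  let ones : Int := (servers.count 1 : Int)
  PySem.Int.floordiv (ones * (ones - 1)) 2

-- ===== PRECONDITION & SPEC =====
def Spec_get_same_row_connections (servers : List Int) (out : Int) : Prop := out = get_same_row_connections_alt servers
instance (servers : List Int) (out : Int) : Decidable (Spec_get_same_row_connections servers out) := by unfold Spec_get_same_row_connections; infer_instance

-- ===== CLAIM (what is proved, stated in full; the proofs are below) =====
def Claim_equal_get_same_row_connections : Prop := ∀ (servers : List Int), Dom_get_same_row_connections servers → Spec_get_same_row_connections servers (get_same_row_connections servers)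

-- ===== LEMMAS AND PROOFS =====

/-- Mathematical shape of A's double loop: for each element, count the 1s to its right if it is 1. -/
def pvPairs : List Int → Int
  | [] => 0
  | x :: r => (if x = 1 then (r.count 1 : Int) else 0) + pvPairs r

lemma pv_countP_aux (x : Int) (r : List Int) :
    (r.countP (fun v => (x == v && v == 1)) : Int) = if x = 1 then (r.count 1 : Int) else 0 := by
  by_cases hx : x = 1
  · subst hx
    rw [if_pos rfl, List.count, Int.natCast_inj]
    apply List.countP_congr
    intro v _
    by_cases h : v = 1 <;> simp [h]
  · rw [if_neg hx]
    norm_cast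
    rw [List.countP_eq_zero]
    intro v _
    simp only [Bool.and_eq_true, beq_iff_eq]
    rintro ⟨rfl, rfl⟩
    exact hx rfl

lemma pv_loop_eq (full : List Int) :
    ∀ (tail : List Int) (s : Nat), full.drop s = tail → ∀ (acc : Int),
    (PySem.List.enumerate tail (s : Int)).foldl
      (fun counter p =>
        (PySem.List.pyRange (p.1 + 1) (full.length : Int) 1).foldl
          (fun c i =>
            if (p.2 == PySem.List.pyGetD full i 0 && PySem.List.pyGetD full i 0 == 1) then c + 1 else c)
          counter)
      acc
    = acc + pvPairs tail := by
  intro tail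
  induction tail with
  | nil => intro s _ acc; simp [PySem.List.enumerate_nil, pvPairs]
  | cons x r ih =>
    intro s hdrop acc
    rw [PySem.List.enumerate_cons, List.foldl_cons]
    have hdrop' : full.drop (s + 1) = r := by
      simpa [List.drop_drop, Nat.add_comm] using congrArg (List.drop 1) hdrop
    have hinner :
        (PySem.List.pyRange ((s : Int) + 1) (full.length : Int) 1).foldl
          (fun c i =>
            if ((x == PySem.List.pyGetD full i 0 && PySem.List.pyGetD full i 0 == 1)) then c + 1 else c)
          acc
        = acc + (if x = 1 then (r.count 1 : Int) else 0) := by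
      have h := PySem.List.foldl_pyRange_pyGetD (xs := full) (a := (s : Int) + 1)
        (d := 0) (f := fun c v => if (x == v && v == 1) then c + 1 else c)
        (init := acc) (by positivity)
      have ha : ((s : Int) + 1).toNat = s + 1 := by omega
      simp only [PySem.List.len_eq, ha, hdrop'] at h
      rw [h, PySem.List.foldl_if_add_one, pv_countP_aux]
    simp only [hinner]
    have := ih (s + 1) hdrop' (acc + (if x = 1 then (r.count 1 : Int) else 0))
    push_cast at this ⊢
    rw [this, pvPairs]
    ring

lemma pv_two_mul_pairs (xs : List Int) :
    2 * pvPairs xs = (xs.count 1 : Int) * ((xs.count 1 : Int) - 1) := by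
  induction xs with
  | nil => simp [pvPairs]
  | cons x r ih =>
    by_cases hx : x = 1
    · subst hx
      rw [pvPairs, if_pos rfl, List.count_cons_self]
      push_cast
      push_cast at ih
      linarith [ih]
    · rw [pvPairs, if_neg hx, List.count_cons_of_ne (by simpa using hx)]
      simpa using ih

-- ===== VERDICT (by name: the statement is the Claim_ definition above) =====
theorem get_same_row_connections_spec : Claim_equal_get_same_row_connections := by
  intro servers _
  unfold Spec_get_same_row_connections get_same_row_connections get_same_row_connections_alt
  have h := pv_loop_eq servers servers 0 (by simp) 0
  simp only [Nat.cast_zero] at h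
  rw [h]
  have h2 := pv_two_mul_pairs servers
  rw [PySem.Int.floordiv_eq_ediv_of_pos (by norm_num), ← h2,
    Int.mul_ediv_cancel_left _ (by norm_num)]
  ring
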